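-- pv_equiv track=rewrite | github.com/Ndugere/testing_python | smaller.py | solution
-- ===== SOURCE A (Python) =====
-- def solution(nums):
--     sorted_nums = sorted(nums)
--     num_to_index = {}
--     res = []
--
--     for i, num in enumerate(sorted_nums):
--         if num not in num_to_index:
--             num_to_index[num] = i
--
--     for each_num in nums:
--         res.append(num_to_index[each_num])
--     return res
-- ===== SOURCE B (Python) =====
-- def solution(nums):
--     return [sum(1 for x in nums if x < num) for num in nums]
-- ===== Notes on version B (the rewrite author's own statement) =====
-- stated objective: simpler
-- what changed: Replaces the sort plus first-occurrence index dictionary with a direct nested count of strictly smaller elements (the first-occurrence rank in the sorted list equals that count).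
import Mathlib
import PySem

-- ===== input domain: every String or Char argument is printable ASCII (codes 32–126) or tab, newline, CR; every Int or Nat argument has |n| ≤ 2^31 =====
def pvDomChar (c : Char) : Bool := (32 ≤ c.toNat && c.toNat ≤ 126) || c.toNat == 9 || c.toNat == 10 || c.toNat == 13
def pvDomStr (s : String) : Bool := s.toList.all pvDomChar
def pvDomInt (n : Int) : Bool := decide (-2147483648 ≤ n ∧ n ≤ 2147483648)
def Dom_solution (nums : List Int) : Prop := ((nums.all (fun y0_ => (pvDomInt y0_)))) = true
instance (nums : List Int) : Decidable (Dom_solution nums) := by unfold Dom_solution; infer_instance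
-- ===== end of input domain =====

-- B replaces the sort + first-occurrence-index dictionary with a direct nested count of
-- strictly smaller elements (simpler; same quadratic cost as the ported insertion sort).

-- ===== PORT A =====
-- num_to_index[each_num] cannot raise KeyError (each_num is always a key), so the
-- lookup is ported with getD; the default 0 is never used.
def solution (nums : List Int) : List Int :=
  let sorted_nums := PySem.List.sorted nums (fun x => x) false
  let num_to_index :=
    (PySem.List.enumerate sorted_nums 0).foldl
      (fun d p => if d.contains p.2 then d else d.insert p.2 p.1)
      (PySem.Dict.empty : PySem.Dict Int Int)
  nums.foldl (fun res each_num => res ++ [num_to_index.getD each_num 0]) []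

-- ===== PORT B =====
def solution_alt (nums : List Int) : List Int :=
  nums.map (fun num =>
    nums.foldl (fun acc x => if x < num then acc + 1 else acc) (0 : Int))

-- ===== PRECONDITION & SPEC =====
def Spec_solution (nums : List Int) (out : List Int) : Prop := out = solution_alt nums
instance (nums : List Int) (out : List Int) : Decidable (Spec_solution nums out) := by unfold Spec_solution; infer_instance

-- ===== CLAIM (what is proved, stated in full; the proofs are below) =====
def Claim_equal_solution : Prop := ∀ (nums : List Int), Dom_solution nums → Spec_solution nums (solution nums)

-- ===== LEMMAS AND PROOFS =====

-- The dict built by A's first loop over an ≤-sorted list maps each member v to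
-- k + (number of elements < v): first-occurrence index with offset k.
theorem dict_loop_getD (xs : List Int) :
    xs.Pairwise (· ≤ ·) →
    ∀ (d : PySem.Dict Int Int) (k v : Int),
      ((PySem.List.enumerate xs k).foldl
        (fun d p => if d.contains p.2 then d else d.insert p.2 p.1) d).getD v 0 =
      if d.contains v then d.getD v 0
      else if v ∈ xs then k + (xs.countP (fun x => decide (x < v)) : Int)
      else 0 := by
  induction xs with
  | nil =>
      intro _ d k v
      simp [PySem.List.enumerate]
      by_cases h : d.contains v
      · simp [h]
      · simp [h, PySem.Dict.getD_of_not_contains d 0 (eq_false_of_ne_true h)]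
  | cons a rest ih =>
      intro hp d k v
      have hrest := (List.pairwise_cons.mp hp).2
      have hle : ∀ y ∈ rest, a ≤ y := (List.pairwise_cons.mp hp).1
      rw [PySem.List.enumerate_cons]
      simp only [List.foldl_cons]
      by_cases hca : d.contains a
      · simp only [hca, if_true]
        rw [ih hrest d (k + 1) v]
        by_cases hcv : d.contains v
        · simp [hcv]
        · -- v not in d, so v ≠ a
          have hva : v ≠ a := by intro h; rw [h] at hcv; simp [hca] at hcv
          simp only [hcv, if_false, List.mem_cons]
          by_cases hvr : v ∈ rest
          · have hav : a < v := lt_of_le_of_ne (hle v hvr) (fun h => hva h.symm)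
            simp [hvr, hva, List.countP_cons, hav]
            ring
          · simp [hvr, hva]
      · simp only [hca, Bool.false_eq_true, if_false]
        rw [ih hrest (d.insert a k) (k + 1) v]
        by_cases hva : v = a
        · subst hva
          have : (d.insert v k).contains v = true := PySem.Dict.contains_insert_self d v k
          simp only [this, if_true]
          rw [PySem.Dict.getD_insert_self]
          simp only [List.mem_cons, true_or, if_true]
          have h0 : rest.countP (fun x => decide (x < v)) = 0 := by
            apply List.countP_eq_zero.mpr
            intro y hy
            simp only [decide_eq_true_eq]
            exact not_lt.mpr (hle y hy)
          by_cases hcv2 : d.contains v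
          · exact absurd hcv2 (by simp [hca])
          · simp [hcv2, List.countP_cons, h0]
        · have hcv' : (d.insert a k).contains v = d.contains v := by
            rw [PySem.Dict.contains_insert]
            simp [hva]
          by_cases hcv : d.contains v
          · rw [hcv'] at *
            simp only [hcv, if_true]
            rw [PySem.Dict.getD_insert]
            simp [hva]
          · simp only [hcv', hcv, if_false, List.mem_cons]
            by_cases hvr : v ∈ rest
            · have hav : a < v := lt_of_le_of_ne (hle v hvr) (fun h => hva h.symm)
              simp [hvr, hva, List.countP_cons, hav]
              ring
            · simp [hvr, hva]

-- ===== VERDICT (by name: the statement is the Claim_ definition above) =====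
theorem solution_spec : Claim_equal_solution := by
  intro nums _
  unfold Spec_solution solution solution_alt
  simp only []
  rw [PySem.List.foldl_append_singleton_eq_map]
  simp only [List.nil_append]
  apply List.map_congr_left
  intro v hv
  rw [dict_loop_getD _ (PySem.List.sorted_pairwise nums (fun x => x)) _ 0 v]
  have hvs : v ∈ PySem.List.sorted nums (fun x => x) false :=
    (PySem.List.mem_sorted nums (fun x => x) false v).mpr hv
  simp only [PySem.Dict.contains_empty, Bool.false_eq_true, if_false, hvs, if_true, zero_add]
  rw [(PySem.List.sorted_perm nums (fun x => x) false).countP_eq (fun x => decide (x < v))]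
  simpa using (PySem.List.foldl_count_if (fun x => decide (x < v)) nums 0).symm
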